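-- pv_equiv track=rewrite | github.com/rqzz/Anwendungsprojekt-Code_Classification | TrainingData/ai_PNTNG_1.py | min_cost_painting
-- ===== SOURCE A (Python) =====
-- def min_cost_painting(N, M, H, layers):
--     layers.sort(key=lambda x: x[1])
--     total_cells = N * M
--     total_cost = 0
--     for i in range(H):
--         if total_cells <= layers[i][0]:
--             total_cost += total_cells * layers[i][1]
--             return total_cost
--         else:
--             total_cells -= layers[i][0]
--             total_cost += layers[i][0] * layers[i][1]
--     return "Impossible"
-- ===== SOURCE B (Python) =====
-- def min_cost_painting(N, M, H, layers):
--     layers.sort(key=lambda x: x[1])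
--     k = max(0, min(H, len(layers)))
--     prefix_cap = [0]
--     prefix_cost = [0]
--     for row in layers[:k]:
--         prefix_cap.append(prefix_cap[-1] + row[0])
--         prefix_cost.append(prefix_cost[-1] + row[0] * row[1])
--     need = N * M
--     for i in range(k):
--         if need <= prefix_cap[i + 1]:
--             return prefix_cost[i] + (need - prefix_cap[i]) * layers[i][1]
--     return "Impossible"
-- ===== Notes on version B (the rewrite author's own statement) =====
-- stated objective: alternative
-- what changed: Instead of A's single loop mutating a running remainder and cost with an early return, B precomputes prefix arrays of cumulative capacity and cumulative full-layer cost over the sorted layers (truncated to min(H, len)) and then searches for the first index whose cumulative capacity covers all cells, deriving the answer from the prefix arrays.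
-- outside the precondition, e.g. on min_cost_painting(0, 0, 0, []): A returns 'Impossible', B returns 'Impossible'; on min_cost_painting(2, 2, 1, [[1, 3]]): A returns 'Impossible', B returns 'Impossible'
import Mathlib
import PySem

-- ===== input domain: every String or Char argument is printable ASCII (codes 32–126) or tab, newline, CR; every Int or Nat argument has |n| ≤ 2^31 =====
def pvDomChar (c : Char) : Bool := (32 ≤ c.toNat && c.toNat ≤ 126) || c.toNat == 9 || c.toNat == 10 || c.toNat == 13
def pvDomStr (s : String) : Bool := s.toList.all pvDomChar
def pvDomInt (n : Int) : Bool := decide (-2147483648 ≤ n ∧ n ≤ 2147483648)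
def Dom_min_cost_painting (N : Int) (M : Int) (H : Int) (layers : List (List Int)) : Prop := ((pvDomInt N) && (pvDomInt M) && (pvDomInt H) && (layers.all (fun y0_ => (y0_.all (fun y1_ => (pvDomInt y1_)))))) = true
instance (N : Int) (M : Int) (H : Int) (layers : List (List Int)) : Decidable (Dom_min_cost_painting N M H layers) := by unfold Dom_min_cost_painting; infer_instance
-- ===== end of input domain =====

-- B replaces A's running remainder/cost loop by prefix arrays over the sorted layers plus a linear
-- search (alternative decomposition, same cost). Both versions sort `layers` in place; the
-- equivalence proved here is about the return value (the in-place sort is identical in A and B).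

-- ===== PORT A =====
-- sort key: lambda x: x[1]
def pvKey (r : List Int) : Int := PySem.List.pyGetD r 1 0

-- the 'for i in range(H)' loop of A; fuel = remaining iterations; pyGetD defaults are only
-- reached outside Pre_ (where the Python raises IndexError)
def pvALoop (L : List (List Int)) (fuel : Nat) (i : Nat) (cells cost : Int) : Option Int :=
  match fuel with
  | 0 => none   -- loop ends: "Impossible"
  | f + 1 =>
    let row := PySem.List.pyGetD L (i : Int) []
    let cap := PySem.List.pyGetD row 0 0
    let price := PySem.List.pyGetD row 1 0
    if cells ≤ cap then some (cost + cells * price)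
    else pvALoop L f (i + 1) (cells - cap) (cost + cap * price)

def min_cost_painting (N : Int) (M : Int) (H : Int) (layers : List (List Int)) : Option Int :=
  let s := PySem.List.sorted layers pvKey
  pvALoop s H.toNat 0 (N * M) 0

-- ===== PORT B =====
-- the prefix-building loop of B: appends to prefix_cap / prefix_cost, reading [-1]
def pvBuild (rows : List (List Int)) (caps costs : List Int) : List Int × List Int :=
  match rows with
  | [] => (caps, costs)
  | r :: rest =>
    pvBuild rest
      (caps ++ [PySem.List.pyGetD caps (-1) 0 + PySem.List.pyGetD r 0 0])
      (costs ++ [PySem.List.pyGetD costs (-1) 0 + PySem.List.pyGetD r 0 0 * PySem.List.pyGetD r 1 0])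

-- the 'for i in range(k)' search loop of B
def pvBScan (s : List (List Int)) (caps costs : List Int) (need : Int) (fuel : Nat) (i : Nat) : Option Int :=
  match fuel with
  | 0 => none   -- no index covers: "Impossible"
  | f + 1 =>
    if need ≤ PySem.List.pyGetD caps ((i : Int) + 1) 0 then
      some (PySem.List.pyGetD costs (i : Int) 0 +
            (need - PySem.List.pyGetD caps (i : Int) 0) *
              PySem.List.pyGetD (PySem.List.pyGetD s (i : Int) []) 1 0)
    else pvBScan s caps costs need f (i + 1)

def min_cost_painting_alt (N : Int) (M : Int) (H : Int) (layers : List (List Int)) : Option Int :=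
  let s := PySem.List.sorted layers pvKey
  let k : Int := max 0 (min H (s.length : Int))
  let pc := pvBuild (PySem.List.slice s none (some k)) [0] [0]
  pvBScan s pc.1 pc.2 (N * M) k.toNat 0

-- ===== PRECONDITION & SPEC =====
-- Pre_ admits exactly the inputs on which A returns an int: every row has length ≥ 2 (else the
-- sort key raises IndexError) and some prefix of the i+1 cheapest layers, i < min(H, len(layers)),
-- already covers all N*M cells (else A raises IndexError past the end of `layers`, or returns the
-- string "Impossible", which is outside the declared return type Optional[int]; B returns
-- "Impossible" there too — see cites).
def Pre_min_cost_painting (N : Int) (M : Int) (H : Int) (layers : List (List Int)) : Prop :=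
  (∀ r ∈ layers, 2 ≤ r.length) ∧
  (∃ i < min H.toNat layers.length,
    N * M ≤ (((PySem.List.sorted layers pvKey).take (i + 1)).map
      (fun r => PySem.List.pyGetD r 0 0)).sum)
instance (N : Int) (M : Int) (H : Int) (layers : List (List Int)) : Decidable (Pre_min_cost_painting N M H layers) := by unfold Pre_min_cost_painting; infer_instance

def pvWitness_min_cost_painting : Int × Int × Int × List (List Int) := (2, 3, 2, [[4, 5], [10, 1]])

def Spec_min_cost_painting (N : Int) (M : Int) (H : Int) (layers : List (List Int)) (out : Option Int) : Prop := out = min_cost_painting_alt N M H layers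
instance (N : Int) (M : Int) (H : Int) (layers : List (List Int)) (out : Option Int) : Decidable (Spec_min_cost_painting N M H layers out) := by unfold Spec_min_cost_painting; infer_instance

-- ===== CLAIM (what is proved, stated in full; the proofs are below) =====
def Claim_equal_min_cost_painting : Prop := ∀ (N : Int) (M : Int) (H : Int) (layers : List (List Int)), Dom_min_cost_painting N M H layers → Pre_min_cost_painting N M H layers → Spec_min_cost_painting N M H layers (min_cost_painting N M H layers)

-- ===== LEMMAS AND PROOFS =====
def pvCapOf (r : List Int) : Int := PySem.List.pyGetD r 0 0
def pvPriceOf (r : List Int) : Int := PySem.List.pyGetD r 1 0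

-- the common functional core both loops compute
def pvSpec (rows : List (List Int)) (cells cost : Int) : Option Int :=
  match rows with
  | [] => none
  | r :: rest =>
    if cells ≤ pvCapOf r then some (cost + cells * pvPriceOf r)
    else pvSpec rest (cells - pvCapOf r) (cost + pvCapOf r * pvPriceOf r)

-- prefix sums of capacities / full costs of the first i rows
def pvPref (s : List (List Int)) (i : Nat) : Int := ((s.take i).map pvCapOf).sum
def pvPrefC (s : List (List Int)) (i : Nat) : Int := ((s.take i).map (fun r => pvCapOf r * pvPriceOf r)).sum

-- value of pvBuild: running tails
def pvPC (rows : List (List Int)) (a : Int) : List Int :=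
  match rows with
  | [] => []
  | r :: rest => (a + pvCapOf r) :: pvPC rest (a + pvCapOf r)
def pvQC (rows : List (List Int)) (b : Int) : List Int :=
  match rows with
  | [] => []
  | r :: rest => (b + pvCapOf r * pvPriceOf r) :: pvQC rest (b + pvCapOf r * pvPriceOf r)

theorem pvBuild_eq (rows : List (List Int)) : ∀ (caps costs : List Int) (a b : Int),
    PySem.List.pyGetD caps (-1) 0 = a → PySem.List.pyGetD costs (-1) 0 = b →
    pvBuild rows caps costs = (caps ++ pvPC rows a, costs ++ pvQC rows b) := by
  induction rows with
  | nil => intro caps costs a b ha hb; simp [pvBuild, pvPC, pvQC]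
  | cons r rest ih =>
    intro caps costs a b ha hb
    rw [pvBuild, ha, hb, ih _ _ (a + pvCapOf r) (b + pvCapOf r * pvPriceOf r)
        (by rw [PySem.List.pyGetD_neg_one_append_singleton]; rfl)
        (by rw [PySem.List.pyGetD_neg_one_append_singleton]; rfl)]
    simp [pvPC, pvQC, pvCapOf, pvPriceOf]

theorem pvALoop_eq_spec (s : List (List Int)) : ∀ (fuel i : Nat) (cells cost : Int),
    i + fuel ≤ s.length →
    pvALoop s fuel i cells cost = pvSpec ((s.drop i).take fuel) cells cost := by
  intro fuel
  induction fuel with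
  | zero => intro i cells cost h; simp [pvALoop, pvSpec]
  | succ f ih =>
    intro i cells cost h
    have hi : i < s.length := by omega
    have hrow : PySem.List.pyGetD s (i : Int) [] = s[i] := by
      rw [PySem.List.pyGetD_natCast]; simp [List.getD, List.getElem?_eq_getElem hi]
    rw [pvALoop, hrow, List.drop_eq_getElem_cons hi, List.take_succ_cons, pvSpec]
    show (if cells ≤ pvCapOf s[i] then _ else _) = _
    split
    · rfl
    · exact ih (i + 1) _ _ (by omega)

theorem pvALoop_of_spec_some (s : List (List Int)) : ∀ (fuel i : Nat) (cells cost : Int) (v : Int),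
    pvSpec (s.drop i) cells cost = some v → s.length - i ≤ fuel →
    pvALoop s fuel i cells cost = some v := by
  intro fuel
  induction fuel with
  | zero =>
    intro i cells cost v hs h
    rw [List.drop_eq_nil_of_le (by omega)] at hs
    simp [pvSpec] at hs
  | succ f ih =>
    intro i cells cost v hs h
    by_cases hi : i < s.length
    · have hrow : PySem.List.pyGetD s (i : Int) [] = s[i] := by
        rw [PySem.List.pyGetD_natCast]; simp [List.getD, List.getElem?_eq_getElem hi]
      rw [List.drop_eq_getElem_cons hi, pvSpec] at hs
      rw [pvALoop, hrow]
      show (if cells ≤ pvCapOf s[i] then _ else _) = _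
      split
      · simpa [*] using hs
      · rw [if_neg (by assumption)] at hs
        exact ih (i + 1) _ _ _ hs (by omega)
    · rw [List.drop_eq_nil_of_le (by omega)] at hs
      simp [pvSpec] at hs

theorem pvSpec_isSome (rows : List (List Int)) : ∀ (cells cost : Int),
    (∃ i < rows.length, cells ≤ ((rows.take (i + 1)).map pvCapOf).sum) →
    (pvSpec rows cells cost).isSome := by
  induction rows with
  | nil => intro cells cost h; simp at h
  | cons r rest ih =>
    intro cells cost ⟨i, hi, hle⟩
    rw [pvSpec]
    split
    · rfl
    · rename_i hgt
      cases i with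
      | zero => simp [pvCapOf] at hle hgt; omega
      | succ j =>
        refine ih _ _ ⟨j, by simpa using hi, ?_⟩
        simp only [List.take_succ_cons, List.map_cons, List.sum_cons] at hle
        omega

theorem pvPC_getD (rows : List (List Int)) : ∀ (a : Int) (j : Nat), j < rows.length →
    (pvPC rows a).getD j 0 = a + ((rows.take (j + 1)).map pvCapOf).sum := by
  induction rows with
  | nil => intro a j h; simp at h
  | cons r rest ih =>
    intro a j h
    cases j with
    | zero => simp [pvPC]
    | succ j =>
      rw [pvPC]
      simp only [List.getD_cons_succ, List.take_succ_cons, List.map_cons, List.sum_cons]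
      rw [ih _ j (by simpa using h)]
      ring

theorem pvQC_getD (rows : List (List Int)) : ∀ (b : Int) (j : Nat), j < rows.length →
    (pvQC rows b).getD j 0 = b + ((rows.take (j + 1)).map (fun r => pvCapOf r * pvPriceOf r)).sum := by
  induction rows with
  | nil => intro b j h; simp at h
  | cons r rest ih =>
    intro b j h
    cases j with
    | zero => simp [pvQC]
    | succ j =>
      rw [pvQC]
      simp only [List.getD_cons_succ, List.take_succ_cons, List.map_cons, List.sum_cons]
      rw [ih _ j (by simpa using h)]
      ring

theorem caps_getD (s : List (List Int)) (k i : Nat) (hik : i ≤ k) (hk : k ≤ s.length) :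
    ([0] ++ pvPC (s.take k) 0).getD i 0 = pvPref s i := by
  cases i with
  | zero => simp [pvPref]
  | succ j =>
    have hlen : (s.take k).length = k := by simp [List.length_take]; omega
    simp only [List.singleton_append, List.getD_cons_succ]
    rw [pvPC_getD _ 0 j (by omega), List.take_take]
    simp [pvPref, Nat.min_eq_left (by omega : j + 1 ≤ k)]

theorem costs_getD (s : List (List Int)) (k i : Nat) (hik : i ≤ k) (hk : k ≤ s.length) :
    ([0] ++ pvQC (s.take k) 0).getD i 0 = pvPrefC s i := by
  cases i with
  | zero => simp [pvPrefC]
  | succ j =>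
    have hlen : (s.take k).length = k := by simp [List.length_take]; omega
    simp only [List.singleton_append, List.getD_cons_succ]
    rw [pvQC_getD _ 0 j (by omega), List.take_take]
    simp [pvPrefC, Nat.min_eq_left (by omega : j + 1 ≤ k)]

theorem pvPref_succ (s : List (List Int)) (i : Nat) (h : i < s.length) :
    pvPref s (i + 1) = pvPref s i + pvCapOf s[i] := by
  unfold pvPref
  rw [List.map_take, List.map_take, ← List.getElem_map pvCapOf (h := by simpa using h)]
  exact List.sum_take_succ _ i (by simpa using h)

theorem pvPrefC_succ (s : List (List Int)) (i : Nat) (h : i < s.length) :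
    pvPrefC s (i + 1) = pvPrefC s i + pvCapOf s[i] * pvPriceOf s[i] := by
  unfold pvPrefC
  rw [List.map_take, List.map_take,
      ← List.getElem_map (fun r => pvCapOf r * pvPriceOf r) (h := by simpa using h)]
  exact List.sum_take_succ _ i (by simpa using h)

theorem pvBScan_eq_spec (s : List (List Int)) (k : Nat) (need : Int) (hk : k ≤ s.length) :
    ∀ (fuel i : Nat), i + fuel = k →
    pvBScan s ([0] ++ pvPC (s.take k) 0) ([0] ++ pvQC (s.take k) 0) need fuel i
      = pvSpec ((s.drop i).take fuel) (need - pvPref s i) (pvPrefC s i) := by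
  intro fuel
  induction fuel with
  | zero => intro i h; simp [pvBScan, pvSpec]
  | succ f ih =>
    intro i h
    have hi : i < s.length := by omega
    have hrow : PySem.List.pyGetD s (i : Int) [] = s[i] := by
      rw [PySem.List.pyGetD_natCast]; simp [List.getD, List.getElem?_eq_getElem hi]
    rw [pvBScan, hrow]
    have hc1 : PySem.List.pyGetD ([0] ++ pvPC (s.take k) 0) ((i : Int) + 1) 0 = pvPref s (i + 1) := by
      rw [show ((i : Int) + 1) = ((i + 1 : Nat) : Int) by push_cast; ring, PySem.List.pyGetD_natCast]
      exact caps_getD s k (i + 1) (by omega) hk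
    have hc0 : PySem.List.pyGetD ([0] ++ pvPC (s.take k) 0) (i : Int) 0 = pvPref s i := by
      rw [PySem.List.pyGetD_natCast]; exact caps_getD s k i (by omega) hk
    have hd0 : PySem.List.pyGetD ([0] ++ pvQC (s.take k) 0) (i : Int) 0 = pvPrefC s i := by
      rw [PySem.List.pyGetD_natCast]; exact costs_getD s k i (by omega) hk
    rw [hc1, hc0, hd0, List.drop_eq_getElem_cons hi, List.take_succ_cons, pvSpec,
        pvPref_succ s i hi]
    by_cases hcond : need - pvPref s i ≤ pvCapOf s[i]
    · rw [if_pos (by omega), if_pos hcond]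
      rfl
    · rw [if_neg (by omega), if_neg hcond, ih (i + 1) (by omega),
          pvPref_succ s i hi, pvPrefC_succ s i hi]
      ring_nf

-- ===== VERDICT (by name: the statement is the Claim_ definition above) =====
theorem min_cost_painting_spec : Claim_equal_min_cost_painting := by
  intro N M H layers _ hpre
  obtain ⟨hrows, hdisj⟩ := hpre
  unfold Spec_min_cost_painting
  simp only [min_cost_painting, min_cost_painting_alt]
  set s := PySem.List.sorted layers pvKey with hs
  have hlen : s.length = layers.length := PySem.List.length_sorted layers pvKey false
  set k : Int := max 0 (min H (s.length : Int)) with hkdef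
  have hk0 : (0 : Int) ≤ k := le_max_left _ _
  have hkle : k.toNat ≤ s.length := by omega
  have hslice : PySem.List.slice s none (some k) = s.take k.toNat :=
    PySem.List.slice_to s hk0
  have hbuild : pvBuild (s.take k.toNat) [0] [0]
      = ([0] ++ pvPC (s.take k.toNat) 0, [0] ++ pvQC (s.take k.toNat) 0) :=
    pvBuild_eq _ _ _ 0 0 (by decide) (by decide)
  have hB : pvBScan s (pvBuild (PySem.List.slice s none (some k)) [0] [0]).1
      (pvBuild (PySem.List.slice s none (some k)) [0] [0]).2 (N * M) k.toNat 0
      = pvSpec (s.take k.toNat) (N * M) 0 := by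
    rw [hslice, hbuild]
    have := pvBScan_eq_spec s k.toNat (N * M) hkle k.toNat 0 (by omega)
    simpa [pvPref, pvPrefC] using this
  rw [hB]
  obtain ⟨i0, hi0, hcov⟩ := hdisj
  by_cases hH : H.toNat ≤ s.length
  · -- min(H, len) = H: A's loop stays in bounds and runs over the first H sorted layers
    have hkn : H.toNat = k.toNat := by omega
    rw [pvALoop_eq_spec s H.toNat 0 (N * M) 0 (by omega), List.drop_zero, hkn]
  · -- min(H, len) = len: Pre_'s covering prefix guarantees A returns before running off the end
    have hkn : k.toNat = s.length := by omega
    rw [hkn, List.take_length] at hB ⊢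
    have hsome := pvSpec_isSome s (N * M) 0 ⟨i0, by omega, by simpa [pvCapOf, hs] using hcov⟩
    obtain ⟨v, hv⟩ := Option.isSome_iff_exists.mp hsome
    rw [hv]
    exact pvALoop_of_spec_some s H.toNat 0 (N * M) 0 v (by rwa [List.drop_zero]) (by omega)
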